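-- pv_equiv track=rewrite | github.com/rohitbishoyi10/Leetcode_dsa | acronym_of_words.py | acronym_of_words
-- ===== SOURCE A (Python) =====
-- def acronym_of_words(st:list,word:str):
--     if len(word)!=len(st):
--         return False
--     count = 0
--     for i in st:
--         if i[0]!=word[count]:
--             return False
--         count+=1
--     return True
-- ===== SOURCE B (Python) =====
-- def acronym_of_words(st: list, word: str):
--     if len(word) != len(st):
--         return False
--     def ok(lo, hi):
--         if hi - lo == 0:
--             return True
--         if hi - lo == 1:
--             return st[lo][0] == word[lo]
--         mid = (lo + hi) // 2
--         return ok(lo, mid) and ok(mid, hi)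
--     return ok(0, len(st))
-- ===== Notes on version B (the rewrite author's own statement) =====
-- stated objective: alternative
-- what changed: A scans the list linearly with a manual counter, comparing and short-circuiting per element; B checks the length guard and then decides the property by divide-and-conquer recursion on index intervals, conjoining the two halves.
import Mathlib
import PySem

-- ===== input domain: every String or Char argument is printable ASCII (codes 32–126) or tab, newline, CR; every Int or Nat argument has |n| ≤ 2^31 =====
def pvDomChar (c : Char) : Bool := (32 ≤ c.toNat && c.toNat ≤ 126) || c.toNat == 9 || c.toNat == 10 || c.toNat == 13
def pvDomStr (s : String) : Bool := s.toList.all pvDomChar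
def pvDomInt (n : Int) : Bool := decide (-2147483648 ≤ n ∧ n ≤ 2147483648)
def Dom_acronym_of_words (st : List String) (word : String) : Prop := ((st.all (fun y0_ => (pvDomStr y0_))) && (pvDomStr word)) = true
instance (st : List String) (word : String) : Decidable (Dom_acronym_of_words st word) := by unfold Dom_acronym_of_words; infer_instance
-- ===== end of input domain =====

-- B replaces A's linear scan with a manual counter by a divide-and-conquer recursion on index intervals (alternative decomposition); return values only.

-- ===== PORT A =====
-- the 'for i in st' loop with counter 'count'; i[0] / word[count] via PySem pyGet? (none = IndexError, excluded by Pre_)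
def pvALoop (st : List String) (wl : List Char) (count : Nat) : Bool :=
  match st with
  | [] => true
  | i :: rest =>
      if PySem.Str.pyGet? i 0 ≠ PySem.List.pyGet? wl (count : Int) then false
      else pvALoop rest wl (count + 1)

def acronym_of_words (st : List String) (word : String) : Bool :=
  if (PySem.Str.len word) ≠ (st.length : Int) then false
  else pvALoop st word.toList 0

-- ===== PORT B =====
-- 'def ok(lo, hi)' of Source B; wl = list of word's chars; st[lo] and word[lo] via pyGet?
-- (none = IndexError; the top call never reaches that inside Pre_, where we return false)
-- the fuel argument (hi - lo at the top call) only makes the halving recursion structural;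
-- it never runs out: each half of [lo, hi) is shorter than hi - lo
def pvBOk (st : List String) (wl : List Char) : Nat → Nat → Nat → Bool
  | 0, _, _ => true
  | fuel + 1, lo, hi =>
    if hi - lo = 0 then true
    else if hi - lo = 1 then
      match PySem.List.pyGet? st (lo : Int) with
      | none => false
      | some w => decide (PySem.Str.pyGet? w 0 = PySem.List.pyGet? wl (lo : Int))
    else
      pvBOk st wl fuel lo ((lo + hi) / 2) && pvBOk st wl fuel ((lo + hi) / 2) hi

def acronym_of_words_alt (st : List String) (word : String) : Bool :=
  if (PySem.Str.len word) ≠ (st.length : Int) then false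
  else pvBOk st word.toList st.length 0 st.length

-- ===== PRECONDITION & SPEC =====
-- Pre_ excludes exactly the inputs on which Python A raises IndexError: equal lengths and an empty
-- string in st every earlier position of which holds a nonempty string whose first letter matches
-- (B raises the same IndexError there; on all other inputs A returns and B matches it).
def Pre_acronym_of_words (st : List String) (word : String) : Prop :=
  word.toList.length ≠ st.length ∨
  ∀ j < st.length, st.getD j "" = "" →
    ∃ i < j, st.getD i "" = "" ∨ (st.getD i "").toList.head? ≠ word.toList[i]?
instance (st : List String) (word : String) : Decidable (Pre_acronym_of_words st word) := by
  unfold Pre_acronym_of_words; infer_instance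
def pvWitness_acronym_of_words : List String × String := (["ab", "cd"], "ac")
def Spec_acronym_of_words (st : List String) (word : String) (out : Bool) : Prop := out = acronym_of_words_alt st word
instance (st : List String) (word : String) (out : Bool) : Decidable (Spec_acronym_of_words st word out) := by unfold Spec_acronym_of_words; infer_instance

-- ===== CLAIM (what is proved, stated in full; the proofs are below) =====
def Claim_equal_acronym_of_words : Prop := ∀ (st : List String) (word : String), Dom_acronym_of_words st word → Pre_acronym_of_words st word → Spec_acronym_of_words st word (acronym_of_words st word)

-- ===== LEMMAS AND PROOFS =====

-- the per-index comparison both ports perform (proof vocabulary only)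
def pvCmpIdx (st : List String) (wl : List Char) (i : Nat) : Bool :=
  match PySem.List.pyGet? st (i : Int) with
  | none => false
  | some w => decide (PySem.Str.pyGet? w 0 = PySem.List.pyGet? wl (i : Int))

lemma pvBOk_all (st : List String) (wl : List Char) (fuel lo hi : Nat)
    (hf : hi - lo ≤ fuel) :
    pvBOk st wl fuel lo hi = (List.range' lo (hi - lo)).all (pvCmpIdx st wl) := by
  induction fuel generalizing lo hi with
  | zero =>
      have h0 : hi - lo = 0 := by omega
      simp [pvBOk, h0]
  | succ fuel ih =>
      by_cases h0 : hi - lo = 0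
      · simp [pvBOk, h0]
      · by_cases h1 : hi - lo = 1
        · rw [show pvBOk st wl (fuel + 1) lo hi
              = (match PySem.List.pyGet? st (lo : Int) with
                 | none => false
                 | some w => decide (PySem.Str.pyGet? w 0 = PySem.List.pyGet? wl (lo : Int)))
            by simp [pvBOk, h1], h1]
          simp only [List.range'_one, List.all_cons, List.all_nil, Bool.and_true]
          cases hw : PySem.List.pyGet? st (lo : Int) <;> simp only [pvCmpIdx, hw]
        · rw [show pvBOk st wl (fuel + 1) lo hi
              = (pvBOk st wl fuel lo ((lo + hi) / 2) && pvBOk st wl fuel ((lo + hi) / 2) hi)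
            by simp [pvBOk, h0, h1]]
          rw [ih lo ((lo + hi) / 2) (by omega), ih ((lo + hi) / 2) hi (by omega), ← List.all_append,
            show hi - lo = ((lo + hi) / 2 - lo) + (hi - (lo + hi) / 2) by omega,
            ← List.range'_append, one_mul,
            show lo + ((lo + hi) / 2 - lo) = (lo + hi) / 2 by omega]

lemma pvALoop_all (wl : List Char) (st pre rest : List String)
    (h : st = pre ++ rest) :
    pvALoop rest wl pre.length = (List.range' pre.length rest.length).all (pvCmpIdx st wl) := by
  induction rest generalizing pre with
  | nil => simp [pvALoop]
  | cons i tl ih =>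
      have hget : PySem.List.pyGet? st ((pre.length : Nat) : Int) = some i := by
        rw [h]; exact PySem.List.pyGet?_append_length pre tl i
      have hcmp : pvCmpIdx st wl pre.length
          = decide (PySem.Str.pyGet? i 0 = PySem.List.pyGet? wl (pre.length : Int)) := by
        simp [pvCmpIdx, hget]
      have hrec := ih (pre ++ [i]) (by simp [h])
      simp only [List.length_append, List.length_cons, List.length_nil, Nat.zero_add] at hrec
      simp only [List.length_cons]
      rw [List.range'_succ, List.all_cons, hcmp]
      unfold pvALoop
      by_cases hc : PySem.Str.pyGet? i 0 = PySem.List.pyGet? wl (pre.length : Int)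
      · simp only [ne_eq, hc, not_true_eq_false, if_neg, not_false_eq_true, decide_true,
          Bool.true_and]
        simpa using hrec
      · simp [hrec]

-- ===== VERDICT (by name: the statement is the Claim_ definition above) =====
theorem acronym_of_words_spec : Claim_equal_acronym_of_words := by
  intro st word _ _
  unfold Spec_acronym_of_words acronym_of_words acronym_of_words_alt
  by_cases hlen : (PySem.Str.len word) ≠ (st.length : Int)
  · rw [if_pos hlen, if_pos hlen]
  · rw [if_neg hlen, if_neg hlen]
    have h0 := pvALoop_all word.toList st [] st (by simp)
    simp only [List.length_nil] at h0
    rw [h0, pvBOk_all st word.toList st.length 0 st.length (by omega)]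
    simp
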